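-- pv_equiv track=rewrite | github.com/YIDEUNKIM/qubo_dataset | posiform/qubo_posiform_hardened.py | partition_variables
-- ===== SOURCE A (Python) =====
-- def partition_variables(n, max_subgraph_size):
--     """
--     n개 변수를 max_subgraph_size 이하의 disjoint 그룹으로 분할.
--
--     논문: Kernighan-Lin recursive bisection (hardware graph용).
--     여기서는 complete graph이므로 순차적 동일 크기 분할.
--
--     Args:
--         n: 총 변수 수
--         max_subgraph_size: 각 subgraph 최대 크기
--
--     Returns:
--         partitions: [[var_indices], ...] — disjoint 변수 그룹
--     """
--     k = max(1, -(-n // max_subgraph_size))  # ceil division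
--     partitions = []
--     for i in range(k):
--         start = i * n // k
--         end = (i + 1) * n // k
--         partitions.append(list(range(start, end)))
--     return partitions
-- ===== SOURCE B (Python) =====
-- def partition_variables(n, max_subgraph_size):
--     k = max(1, -(-n // max_subgraph_size))  # ceil division, same k as A
--     base, rem = divmod(n, k)
--     partitions = []
--     start = 0
--     acc = 0
--     for _ in range(k):
--         acc += rem
--         if acc >= k:
--             size = base + 1
--             acc -= k
--         else:
--             size = base
--         partitions.append(list(range(start, start + size)))
--         start += size
--     return partitions
-- ===== Notes on version B (the rewrite author's own statement) =====
-- stated objective: alternative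
-- what changed: B replaces A's per-group closed-form boundaries (start = i*n//k, end = (i+1)*n//k, two divisions per group) with a single divmod(n, k) and an error-accumulator (Bresenham-style) loop that threads start/acc and decides each group's size by acc >= k.
import Mathlib
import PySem

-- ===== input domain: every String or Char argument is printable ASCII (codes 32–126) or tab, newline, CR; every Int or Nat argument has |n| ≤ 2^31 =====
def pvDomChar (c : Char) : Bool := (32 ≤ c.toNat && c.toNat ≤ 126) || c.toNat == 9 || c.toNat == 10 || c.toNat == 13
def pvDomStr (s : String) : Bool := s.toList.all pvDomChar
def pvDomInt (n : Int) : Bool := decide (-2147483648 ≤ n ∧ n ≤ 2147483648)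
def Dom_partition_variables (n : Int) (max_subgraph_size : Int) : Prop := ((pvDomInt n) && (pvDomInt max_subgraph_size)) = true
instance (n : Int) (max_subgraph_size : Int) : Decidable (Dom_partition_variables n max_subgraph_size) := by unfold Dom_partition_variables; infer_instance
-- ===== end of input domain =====

-- B computes each group's size with one divmod(n,k) and a Bresenham-style error accumulator
-- instead of A's two independent floor-division boundaries per group (alternative decomposition, same cost).

-- ===== PORT A =====
def partition_variables (n : Int) (max_subgraph_size : Int) : List (List Int) :=
  let k := max 1 (-(PySem.Int.floordiv (-n) max_subgraph_size))
  (PySem.List.pyRange 0 k 1).foldl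
    (fun partitions i =>
      let start := PySem.Int.floordiv (i * n) k
      let «end» := PySem.Int.floordiv ((i + 1) * n) k
      partitions ++ [PySem.List.pyRange start «end» 1]) []

-- ===== PORT B =====
-- the 'for _ in range(k)' loop of Source B, threading (start, acc)
def pvBuildB (base rem k : Int) : Nat → Int → Int → List (List Int)
  | 0, _, _ => []
  | cnt + 1, start, acc =>
    let acc1 := acc + rem
    let size := if k ≤ acc1 then base + 1 else base
    let acc2 := if k ≤ acc1 then acc1 - k else acc1
    PySem.List.pyRange start (start + size) 1 :: pvBuildB base rem k cnt (start + size) acc2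

def partition_variables_alt (n : Int) (max_subgraph_size : Int) : List (List Int) :=
  let k := max 1 (-(PySem.Int.floordiv (-n) max_subgraph_size))
  let base := PySem.Int.floordiv n k
  let rem := PySem.Int.mod n k
  pvBuildB base rem k k.toNat 0 0

-- ===== PRECONDITION & SPEC =====
-- Pre_ excludes exactly max_subgraph_size = 0, where A (and B) raise ZeroDivisionError.
def Pre_partition_variables (n : Int) (max_subgraph_size : Int) : Prop := max_subgraph_size ≠ 0
instance (n : Int) (max_subgraph_size : Int) : Decidable (Pre_partition_variables n max_subgraph_size) := by unfold Pre_partition_variables; infer_instance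
def pvWitness_partition_variables : Int × Int := (7, 3)

def Spec_partition_variables (n : Int) (max_subgraph_size : Int) (out : List (List Int)) : Prop := out = partition_variables_alt n max_subgraph_size
instance (n : Int) (max_subgraph_size : Int) (out : List (List Int)) : Decidable (Spec_partition_variables n max_subgraph_size out) := by unfold Spec_partition_variables; infer_instance

-- ===== CLAIM (what is proved, stated in full; the proofs are below) =====
def Claim_equal_partition_variables : Prop := ∀ (n : Int) (max_subgraph_size : Int), Dom_partition_variables n max_subgraph_size → Pre_partition_variables n max_subgraph_size → Spec_partition_variables n max_subgraph_size (partition_variables n max_subgraph_size)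

-- ===== LEMMAS AND PROOFS =====

-- foldl-with-append is a map
lemma pv_foldl_append_map {α β : Type} (f : α → β) :
    ∀ (l : List α) (init : List β),
      l.foldl (fun p i => p ++ [f i]) init = init ++ l.map f := by
  intro l
  induction l with
  | nil => intro init; simp
  | cons x xs ih => intro init; simp [List.foldl, ih]

-- floor-div/mod addition law for a positive divisor
lemma pv_floordiv_add (a b k : Int) (hk : 0 < k) :
    PySem.Int.floordiv (a + b) k =
      (if k ≤ PySem.Int.mod a k + PySem.Int.mod b k
       then PySem.Int.floordiv a k + PySem.Int.floordiv b k + 1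
       else PySem.Int.floordiv a k + PySem.Int.floordiv b k) ∧
    PySem.Int.mod (a + b) k =
      (if k ≤ PySem.Int.mod a k + PySem.Int.mod b k
       then PySem.Int.mod a k + PySem.Int.mod b k - k
       else PySem.Int.mod a k + PySem.Int.mod b k) := by
  have ha := PySem.Int.floordiv_mul_add_mod a k
  have hb := PySem.Int.floordiv_mul_add_mod b k
  have hab := PySem.Int.floordiv_mul_add_mod (a + b) k
  have hra0 := PySem.Int.mod_nonneg a hk
  have hralt := PySem.Int.mod_lt a hk
  have hrb0 := PySem.Int.mod_nonneg b hk
  have hrblt := PySem.Int.mod_lt b hk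
  have hrab0 := PySem.Int.mod_nonneg (a + b) hk
  have hrablt := PySem.Int.mod_lt (a + b) hk
  set qa := PySem.Int.floordiv a k
  set qb := PySem.Int.floordiv b k
  set qab := PySem.Int.floordiv (a + b) k
  set ra := PySem.Int.mod a k
  set rb := PySem.Int.mod b k
  set rab := PySem.Int.mod (a + b) k
  have key : (qab - qa - qb) * k = ra + rb - rab := by nlinarith [ha, hb, hab]
  have hd : qab - qa - qb = 0 ∨ qab - qa - qb = 1 := by
    rcases lt_trichotomy (qab - qa - qb) 0 with h | h | h
    · exfalso
      have : (qab - qa - qb) * k ≤ -1 * k := by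
        apply mul_le_mul_of_nonneg_right _ (le_of_lt hk); omega
      omega
    · left; exact h
    · rcases lt_or_ge (qab - qa - qb) 2 with h2 | h2
      · right; omega
      · exfalso
        have : 2 * k ≤ (qab - qa - qb) * k := by
          apply mul_le_mul_of_nonneg_right h2 (le_of_lt hk)
        omega
  rcases hd with h0 | h1
  · have hr : rab = ra + rb := by rw [h0] at key; omega
    have hlt : ¬ k ≤ ra + rb := by omega
    constructor
    · rw [if_neg hlt]; omega
    · rw [if_neg hlt]; omega
  · have hr : rab = ra + rb - k := by rw [h1] at key; omega
    have hge : k ≤ ra + rb := by omega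
    constructor
    · rw [if_pos hge]; omega
    · rw [if_pos hge]; omega

-- the accumulator loop of B reproduces A's closed-form group boundaries
lemma pv_build_eq (n k : Int) (hk : 0 < k) :
    ∀ (cnt : Nat) (i : Int), i + cnt = k →
      pvBuildB (PySem.Int.floordiv n k) (PySem.Int.mod n k) k cnt
        (PySem.Int.floordiv (i * n) k) (PySem.Int.mod (i * n) k)
      = (PySem.List.pyRange i k 1).map
          (fun j => PySem.List.pyRange (PySem.Int.floordiv (j * n) k)
                                       (PySem.Int.floordiv ((j + 1) * n) k) 1) := by
  intro cnt
  induction cnt with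
  | zero =>
    intro i hi
    have : k ≤ i := by omega
    rw [PySem.List.pyRange_one_eq_nil this]
    simp [pvBuildB]
  | succ m ih =>
    intro i hi
    have hik : i < k := by push_cast at hi ⊢; omega
    rw [PySem.List.pyRange_one_cons hik]
    have hadd := pv_floordiv_add (i * n) n k hk
    have harg : i * n + n = (i + 1) * n := by ring
    rw [harg] at hadd
    obtain ⟨hq, hr⟩ := hadd
    have hnext : i + 1 + (m : Int) = k := by push_cast at hi ⊢; omega
    have hrec := ih (i + 1) hnext
    rw [hq, hr] at hrec
    simp only [pvBuildB, List.map_cons]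
    rw [hq]
    by_cases hc : k ≤ PySem.Int.mod (i * n) k + PySem.Int.mod n k
    · simp only [if_pos hc] at hrec ⊢
      have e1 : PySem.Int.floordiv (i * n) k + (PySem.Int.floordiv n k + 1)
          = PySem.Int.floordiv (i * n) k + PySem.Int.floordiv n k + 1 := by ring
      rw [e1]
      exact congrArg (List.cons _) hrec
    · simp only [if_neg hc] at hrec ⊢
      exact congrArg (List.cons _) hrec

-- ===== VERDICT (by name: the statement is the Claim_ definition above) =====
theorem partition_variables_spec : Claim_equal_partition_variables := by
  intro n m _ hpre
  unfold Spec_partition_variables partition_variables partition_variables_alt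
  set k := max 1 (-(PySem.Int.floordiv (-n) m)) with hkdef
  have hk : 0 < k := by
    have : (1:Int) ≤ k := le_max_left _ _
    omega
  rw [pv_foldl_append_map]
  have h0 : ((0:Int)) + (k.toNat : Int) = k := by omega
  have := pv_build_eq n k hk k.toNat 0 h0
  simp only [zero_mul, PySem.Int.floordiv, PySem.Int.mod] at this ⊢
  simpa using this.symm
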